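-- pv_equiv track=rewrite | github.com/albarami/thematics | analysis/INTEGRATED_D1_D4/_working/build_integrated_d1_d4_package.py | sort_sheet_rows
-- ===== SOURCE A (Python) =====
-- def sort_sheet_rows(sheets: dict[str, list[dict[str, str]]], sort_keys: list[str]) -> dict[str, list[dict[str, str]]]:
--     """Sort workbook sheet rows by common keys where present.
--
--     Args:
--         sheets: Workbook sheet mapping.
--         sort_keys: Candidate row keys used for sorting.
--
--     Returns:
--         A new workbook sheet mapping with sorted rows.
--     """
--     sorted_sheets: dict[str, list[dict[str, str]]] = {}
--     for sheet_name, rows in sheets.items():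
--         if not rows:
--             sorted_sheets[sheet_name] = rows
--             continue
--         applicable_keys = [key for key in sort_keys if key in rows[0]]
--         sorted_sheets[sheet_name] = sorted(
--             rows,
--             key=lambda row: tuple(row[key] for key in applicable_keys),
--         )
--     return sorted_sheets
-- ===== SOURCE B (Python) =====
-- def _sort_rows(rows: list[dict[str, str]], sort_keys: list[str]) -> list[dict[str, str]]:
--     if not rows:
--         return rows
--     applicable_keys = [key for key in sort_keys if key in rows[0]]
--     ordered = list(rows)
--     # Multi-pass stable sort: sorting by each key from least to most significant
--     # is equivalent to one lexicographic sort by the full key tuple.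
--     for key in reversed(applicable_keys):
--         ordered.sort(key=lambda row, key=key: row[key])
--     return ordered
--
--
-- def sort_sheet_rows(sheets: dict[str, list[dict[str, str]]], sort_keys: list[str]) -> dict[str, list[dict[str, str]]]:
--     return {sheet_name: _sort_rows(rows, sort_keys) for sheet_name, rows in sheets.items()}
-- ===== Notes on version B (the rewrite author's own statement) =====
-- stated objective: alternative
-- what changed: Replaces the single sort by a tuple-of-values key with a multi-pass radix-style sort: one stable single-key sort per applicable key, applied in reverse key order, whose cumulative effect equals the lexicographic tuple sort.
-- outside the precondition, e.g. on sort_sheet_rows({'s': [{'a': '1'}, {}]}, ['a']): A raises KeyError, B raises KeyError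
import Mathlib
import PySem

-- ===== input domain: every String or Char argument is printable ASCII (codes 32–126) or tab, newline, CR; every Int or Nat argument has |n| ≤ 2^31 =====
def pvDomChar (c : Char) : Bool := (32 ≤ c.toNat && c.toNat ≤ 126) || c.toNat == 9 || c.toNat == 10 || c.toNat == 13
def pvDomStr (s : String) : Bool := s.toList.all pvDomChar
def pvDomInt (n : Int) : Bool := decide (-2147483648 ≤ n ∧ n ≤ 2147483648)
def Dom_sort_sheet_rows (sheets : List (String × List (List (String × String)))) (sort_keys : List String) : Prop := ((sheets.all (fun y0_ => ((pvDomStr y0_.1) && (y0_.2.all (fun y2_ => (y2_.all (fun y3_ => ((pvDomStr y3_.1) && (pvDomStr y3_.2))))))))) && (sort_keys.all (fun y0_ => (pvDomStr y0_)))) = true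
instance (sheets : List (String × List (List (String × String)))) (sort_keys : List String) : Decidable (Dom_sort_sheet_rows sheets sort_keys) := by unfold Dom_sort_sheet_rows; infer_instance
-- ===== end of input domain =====

-- B replaces A's single sort keyed by the tuple of all applicable key values with one stable
-- single-key sort per applicable key in reverse key order (radix style); same results, no speed claim.

-- ===== PORT A =====
def sort_sheet_rows (sheets : List (String × List (List (String × String)))) (sort_keys : List String) : List (String × List (List (String × String))) :=
  (sheets.foldl
    (fun sorted_sheets p =>
      sorted_sheets.insert p.1
        (match p.2 with
         | [] => p.2
         | r0 :: _ =>
           let applicable_keys := sort_keys.filter (fun key => (PySem.Dict.mk r0).contains key)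
           PySem.List.sorted p.2
             (fun row => applicable_keys.map (fun key => (PySem.Dict.mk row).getD key "")) false))
    PySem.Dict.empty).items

-- ===== PORT B =====
-- helper _sort_rows of Source B
def pvSortRowsB (rows : List (List (String × String))) (sort_keys : List String) : List (List (String × String)) :=
  match rows with
  | [] => rows
  | r0 :: _ =>
    let applicable_keys := sort_keys.filter (fun key => (PySem.Dict.mk r0).contains key)
    applicable_keys.reverse.foldl
      (fun ordered key => PySem.List.sorted ordered (fun row => (PySem.Dict.mk row).getD key "") false)
      rows

def sort_sheet_rows_alt (sheets : List (String × List (List (String × String)))) (sort_keys : List String) : List (String × List (List (String × String))) :=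
  sheets.map (fun p => (p.1, pvSortRowsB p.2 sort_keys))

-- ===== PRECONDITION & SPEC =====
-- Pre_ excludes (a) duplicate sheet names and duplicate keys inside a row, which are not
-- representable in A's Python argument type dict[str, ...] / dict[str, str], and (b) sheets in
-- which a sort key present in the first row is missing from a later row, where A raises KeyError.
def Pre_sort_sheet_rows (sheets : List (String × List (List (String × String)))) (sort_keys : List String) : Prop :=
  (sheets.map Prod.fst).Nodup ∧
  (∀ p ∈ sheets, ∀ row ∈ p.2, (row.map Prod.fst).Nodup) ∧
  (∀ p ∈ sheets, ∀ r0 ∈ p.2.take 1, ∀ k ∈ sort_keys, k ∈ r0.map Prod.fst →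
    ∀ row ∈ p.2, k ∈ row.map Prod.fst)
instance (sheets : List (String × List (List (String × String)))) (sort_keys : List String) : Decidable (Pre_sort_sheet_rows sheets sort_keys) := by unfold Pre_sort_sheet_rows; infer_instance

def pvWitness_sort_sheet_rows : (List (String × List (List (String × String)))) × List String :=
  ([("s", [[("a", "2"), ("b", "x")], [("a", "1"), ("b", "y")]]), ("t", [])], ["a", "c"])

def Spec_sort_sheet_rows (sheets : List (String × List (List (String × String)))) (sort_keys : List String) (out : List (String × List (List (String × String)))) : Prop := out = sort_sheet_rows_alt sheets sort_keys
instance (sheets : List (String × List (List (String × String)))) (sort_keys : List String) (out : List (String × List (List (String × String)))) : Decidable (Spec_sort_sheet_rows sheets sort_keys out) := by unfold Spec_sort_sheet_rows; infer_instance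

-- ===== CLAIM (what is proved, stated in full; the proofs are below) =====
def Claim_equal_sort_sheet_rows : Prop := ∀ (sheets : List (String × List (List (String × String)))) (sort_keys : List String), Dom_sort_sheet_rows sheets sort_keys → Pre_sort_sheet_rows sheets sort_keys → Spec_sort_sheet_rows sheets sort_keys (sort_sheet_rows sheets sort_keys)

-- ===== LEMMAS AND PROOFS =====

-- the Decidable instance argument of PySem.List.sorted is irrelevant
theorem pv_sorted_inst_irrel {α κ : Type} [LT κ] (d1 d2 : DecidableLT κ) (xs : List α) (key : α → κ) (r : Bool) :
    @PySem.List.sorted α κ _ d1 xs key r = @PySem.List.sorted α κ _ d2 xs key r := by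
  congr 1

-- inserting one more (last) element = insertBy into the sorted prefix
theorem pv_sorted_append_singleton {α κ : Type} [LT κ] [DecidableLT κ] (l : List α) (x : α) (key : α → κ) :
    PySem.List.sorted (l ++ [x]) key false
      = PySem.List.insertBy (fun a b => decide (key a < key b)) x (PySem.List.sorted l key false) := by
  simp [PySem.List.sorted_eq_foldl_insertBy, List.foldl_append]

-- insertBy with a lexicographic (f, δ)-key commutes with map Prod.fst when the inserted
-- element's δ-value is larger than everything in the list (stability of insertion)
theorem pv_insertBy_map_fst {α ι μ β : Type} [LinearOrder μ] [LinearOrder β]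
    (f : α → β) (δ : α × ι → μ) (p : α × ι) (ws : List (α × ι))
    (h : ∀ q ∈ ws, δ q < δ p) :
    (PySem.List.insertBy (fun a b => decide (toLex (f a.1, δ a) < toLex (f b.1, δ b))) p ws).map Prod.fst
      = PySem.List.insertBy (fun a b => decide (f a < f b)) p.1 (ws.map Prod.fst) := by
  induction ws with
  | nil => simp [PySem.List.insertBy]
  | cons q ws ih =>
    have hqp : δ q < δ p := h q List.mem_cons_self
    have hcond : (toLex (f p.1, δ p) < toLex (f q.1, δ q)) ↔ f p.1 < f q.1 := by
      rw [Prod.Lex.toLex_lt_toLex]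
      constructor
      · rintro (h1 | ⟨h1, h2⟩)
        · exact h1
        · exact absurd h2 (not_lt_of_gt hqp)
      · exact Or.inl
    simp only [PySem.List.insertBy, List.map_cons]
    by_cases hf : f p.1 < f q.1
    · simp [hcond, hf]
    · simp only [hcond, hf, decide_false, if_neg, Bool.false_eq_true, not_false_eq_true,
        List.map_cons]
      rw [ih (fun q hq => h q (List.mem_cons_of_mem _ hq))]

-- a stable sort of undecorated elements = the decorated sort with a strictly increasing
-- decoration δ used as tie-breaker, projected back
theorem pv_sorted_map_fst {α ι μ β : Type} [LinearOrder μ] [LinearOrder β]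
    (f : α → β) (δ : α × ι → μ) (zs : List (α × ι))
    (h : zs.Pairwise (fun p q => δ p < δ q)) :
    PySem.List.sorted (zs.map Prod.fst) f false
      = (PySem.List.sorted zs (fun p => toLex (f p.1, δ p)) false).map Prod.fst := by
  induction zs using List.reverseRecOn with
  | nil => rfl
  | append_singleton zs p ih =>
    rw [List.pairwise_append] at h
    obtain ⟨h1, -, h3⟩ := h
    have hlt : ∀ q ∈ zs, δ q < δ p := fun q hq => h3 q hq p List.mem_cons_self
    rw [List.map_append, List.map_singleton, pv_sorted_append_singleton,
      pv_sorted_append_singleton, ih h1]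
    exact (pv_insertBy_map_fst f δ p _
      (fun q hq => hlt q ((PySem.List.mem_sorted _ _ _ _).mp hq))).symm

-- a key-nondecreasing list whose decorations are distinct is strictly key-increasing
theorem pv_pairwise_lt_of_le {α ι μ : Type} [LinearOrder μ]
    (K : α × ι → μ) (hK : ∀ p q, K p = K q → p.2 = q.2) (l : List (α × ι))
    (h1 : l.Pairwise (fun p q => K p ≤ K q)) (h2 : (l.map Prod.snd).Nodup) :
    l.Pairwise (fun p q => K p < K q) := by
  induction l with
  | nil => exact List.Pairwise.nil
  | cons p l ih =>
    rw [List.pairwise_cons] at h1 ⊢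
    rw [List.map_cons, List.nodup_cons] at h2
    refine ⟨fun q hq => lt_of_le_of_ne (h1.1 q hq) ?_, ih h1.2 h2.2⟩
    intro he
    exact h2.1 (hK p q he ▸ List.mem_map_of_mem hq)

-- composition of stable sorts: last-key-first multi-pass = one lexicographic-tuple sort
theorem pv_sorted_compose {α β : Type} [LinearOrder β] (xs : List α) (f : α → β) (g : α → List β) :
    PySem.List.sorted (PySem.List.sorted xs g false) f false
      = PySem.List.sorted xs (fun x => f x :: g x) false := by
  have hfst : xs.zipIdx.map Prod.fst = xs := List.zipIdx_map_fst 0 xs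
  have hsnd : xs.zipIdx.map Prod.snd = List.range' 0 xs.length := List.zipIdx_map_snd 0 xs
  have hzs_pair : xs.zipIdx.Pairwise (fun p q => p.2 < q.2) := by
    have h := List.pairwise_lt_range' (s := 0) (n := xs.length) 1
    rw [← hsnd, List.pairwise_map] at h
    exact h
  have hnodup : (xs.zipIdx.map Prod.snd).Nodup := by
    rw [hsnd]; exact List.nodup_range' 1
  have step1 : PySem.List.sorted xs g false
      = (PySem.List.sorted xs.zipIdx (fun p => toLex (g p.1, p.2)) false).map Prod.fst := by
    conv_lhs => rw [← hfst]
    rw [pv_sorted_inst_irrel (d2 := (LinearOrder.toDecidableLT : DecidableLT (List β)))]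
    exact pv_sorted_map_fst g Prod.snd xs.zipIdx hzs_pair
  have step5 : PySem.List.sorted xs (fun x => f x :: g x) false
      = (PySem.List.sorted xs.zipIdx (fun p => toLex ((f p.1 :: g p.1 : List β), p.2)) false).map Prod.fst := by
    conv_lhs => rw [← hfst]
    rw [pv_sorted_inst_irrel (d2 := (LinearOrder.toDecidableLT : DecidableLT (List β)))]
    exact pv_sorted_map_fst (fun x => f x :: g x) Prod.snd xs.zipIdx hzs_pair
  have hwsperm : (PySem.List.sorted xs.zipIdx (fun p => toLex (g p.1, p.2)) false).Perm xs.zipIdx :=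
    PySem.List.sorted_perm _ _ _
  have hvsperm : (PySem.List.sorted xs.zipIdx (fun p => toLex ((f p.1 :: g p.1 : List β), p.2)) false).Perm xs.zipIdx :=
    PySem.List.sorted_perm _ _ _
  have hws_nodup : ((PySem.List.sorted xs.zipIdx (fun p => toLex (g p.1, p.2)) false).map Prod.snd).Nodup :=
    ((hwsperm.map Prod.snd).nodup_iff).mpr hnodup
  have hvs_nodup : ((PySem.List.sorted xs.zipIdx (fun p => toLex ((f p.1 :: g p.1 : List β), p.2)) false).map Prod.snd).Nodup :=
    ((hvsperm.map Prod.snd).nodup_iff).mpr hnodup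
  have hws_strict : (PySem.List.sorted xs.zipIdx (fun p => toLex (g p.1, p.2)) false).Pairwise
      (fun p q => (toLex (g p.1, p.2) : Lex ((List β) × Nat)) < toLex (g q.1, q.2)) := by
    refine pv_pairwise_lt_of_le _ ?_ _ (PySem.List.sorted_pairwise _ _) hws_nodup
    intro p q he
    have := toLex_inj.mp he
    exact (Prod.mk.injEq _ _ _ _ ▸ this).2
  have hvs_strict : (PySem.List.sorted xs.zipIdx (fun p => toLex ((f p.1 :: g p.1 : List β), p.2)) false).Pairwise
      (fun p q => (toLex ((f p.1 :: g p.1 : List β), p.2) : Lex ((List β) × Nat)) < toLex ((f q.1 :: g q.1 : List β), q.2)) := by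
    refine pv_pairwise_lt_of_le _ ?_ _ (PySem.List.sorted_pairwise _ _) hvs_nodup
    intro p q he
    have := toLex_inj.mp he
    exact (Prod.mk.injEq _ _ _ _ ▸ this).2
  have step3 : PySem.List.sorted ((PySem.List.sorted xs.zipIdx (fun p => toLex (g p.1, p.2)) false).map Prod.fst) f false
      = (PySem.List.sorted (PySem.List.sorted xs.zipIdx (fun p => toLex (g p.1, p.2)) false)
          (fun p => toLex (f p.1, (toLex (g p.1, p.2) : Lex ((List β) × Nat)))) false).map Prod.fst :=
    pv_sorted_map_fst f (fun p => toLex (g p.1, p.2)) _ hws_strict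
  have step4 : PySem.List.sorted (PySem.List.sorted xs.zipIdx (fun p => toLex (g p.1, p.2)) false)
      (fun p => toLex (f p.1, (toLex (g p.1, p.2) : Lex ((List β) × Nat)))) false
      = PySem.List.sorted xs.zipIdx (fun p => toLex ((f p.1 :: g p.1 : List β), p.2)) false := by
    apply PySem.List.sorted_eq_of_perm_of_pairwise_lt
    · exact hvsperm.trans hwsperm.symm
    · refine hvs_strict.imp ?_
      intro p q hpq
      rw [Prod.Lex.toLex_lt_toLex] at hpq ⊢
      rw [List.cons_lt_cons_iff] at hpq
      rw [Prod.Lex.toLex_lt_toLex]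
      rcases hpq with (hf | ⟨hfg, hg⟩) | ⟨heq, hi⟩
      · exact Or.inl hf
      · exact Or.inr ⟨hfg, Or.inl hg⟩
      · have h1 : f p.1 = f q.1 := (List.cons.injEq _ _ _ _ ▸ heq).1
        have h2 : g p.1 = g q.1 := (List.cons.injEq _ _ _ _ ▸ heq).2
        exact Or.inr ⟨h1, Or.inr ⟨h2, hi⟩⟩
  rw [step1, step3, step4, ← step5]

-- B's reverse multi-pass loop computes A's single lexicographic-tuple sort
theorem pv_multipass {α : Type} (keys : List String) (rows : List α) (v : α → String → String) :
    keys.reverse.foldl (fun ordered k => PySem.List.sorted ordered (fun row => v row k) false) rows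
      = PySem.List.sorted rows (fun row => keys.map (v row)) false := by
  induction keys with
  | nil =>
    simp only [List.reverse_nil, List.foldl_nil, List.map_nil]
    rw [pv_sorted_inst_irrel (d2 := (LinearOrder.toDecidableLT : DecidableLT (List String)))]
    exact (PySem.List.sorted_eq_self_of_pairwise rows _
      (List.pairwise_of_forall_sublist (fun _ => le_refl _))).symm
  | cons k ks ih =>
    rw [List.reverse_cons, List.foldl_append, List.foldl_cons, List.foldl_nil, ih]
    simp only [List.map_cons]
    rw [pv_sorted_inst_irrel (d2 := (LinearOrder.toDecidableLT : DecidableLT String))]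
    exact pv_sorted_compose rows (fun row => v row k) (fun row => ks.map (v row))

-- ===== VERDICT (by name: the statement is the Claim_ definition above) =====
theorem sort_sheet_rows_spec : Claim_equal_sort_sheet_rows := by
  intro sheets sort_keys _hDom hPre
  obtain ⟨hnames, -, -⟩ := hPre
  unfold Spec_sort_sheet_rows sort_sheet_rows sort_sheet_rows_alt
  have hA : ∀ (F : (String × List (List (String × String))) → List (List (String × String))),
      (sheets.foldl (fun d p => d.insert p.1 (F p)) PySem.Dict.empty).items
        = sheets.map (fun p => (p.1, F p)) := by
    intro F
    rw [PySem.Dict.items_foldl_insert_fresh sheets Prod.fst F PySem.Dict.empty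
      (fun p _ => PySem.Dict.contains_empty _) hnames]
    simp [PySem.Dict.empty]
  refine Eq.trans (hA (fun p =>
      (match p.2 with
       | [] => p.2
       | r0 :: _ =>
         let applicable_keys := sort_keys.filter (fun key => (PySem.Dict.mk r0).contains key)
         PySem.List.sorted p.2
           (fun row => applicable_keys.map (fun key => (PySem.Dict.mk row).getD key "")) false))) ?_
  refine List.map_congr_left ?_
  intro p _hp
  cases hrows : p.2 with
  | nil =>
    simp [pvSortRowsB]
  | cons r0 rest =>
    simp only [pvSortRowsB, Prod.mk.injEq, true_and]
    exact (pv_multipass (sort_keys.filter (fun key => (PySem.Dict.mk r0).contains key))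
      (r0 :: rest) (fun row k => (PySem.Dict.mk row).getD k "")).symm
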